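-- pv_equiv track=rewrite | github.com/Algorithm-study-busan/hosung | python/Prog_쌍둥이 빌딩 숲.py | solution
-- ===== SOURCE A (Python) =====
-- def solution(n, count):
--     dp = [[-1 for _ in range(101)] for _ in range(101)]
--     MOD = 1_000_000_007
--
--     def find_dp(nn, cc) :
--         if nn == n and cc == count :
--             return 1
--         if nn == n or cc > count:
--             return 0
--
--         if dp[nn][cc] != -1 : return dp[nn][cc]
--
--
--         dp[nn][cc] = find_dp(nn+1, cc+1) + nn*2 * find_dp(nn+1, cc)
--         dp[nn][cc] %= MOD
--         return dp[nn][cc]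
--
--     return find_dp(1,1)
-- ===== SOURCE B (Python) =====
-- def solution(n, count):
--     MOD = 1_000_000_007
--     if count < 1 or count > n:
--         return 0
--     # row for level nn: cur[cc] = number of arrangements from state (nn, cc); padded with 0 at both ends
--     cur = [0] + [1 if cc == count else 0 for cc in range(1, count + 1)] + [0]
--     for nn in range(n - 1, 0, -1):
--         cur = [0] + [(cur[cc + 1] + 2 * nn * cur[cc]) % MOD for cc in range(1, count + 1)] + [0]
--     return cur[1]
-- ===== Notes on version B (the rewrite author's own statement) =====
-- stated objective: alternative
-- what changed: Replaces the recursive memoized top-down search (101x101 memo array, nested closure) with an explicit bottom-up DP that keeps only one row per level and fills it iteratively from level n down to 1.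
import Mathlib
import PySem

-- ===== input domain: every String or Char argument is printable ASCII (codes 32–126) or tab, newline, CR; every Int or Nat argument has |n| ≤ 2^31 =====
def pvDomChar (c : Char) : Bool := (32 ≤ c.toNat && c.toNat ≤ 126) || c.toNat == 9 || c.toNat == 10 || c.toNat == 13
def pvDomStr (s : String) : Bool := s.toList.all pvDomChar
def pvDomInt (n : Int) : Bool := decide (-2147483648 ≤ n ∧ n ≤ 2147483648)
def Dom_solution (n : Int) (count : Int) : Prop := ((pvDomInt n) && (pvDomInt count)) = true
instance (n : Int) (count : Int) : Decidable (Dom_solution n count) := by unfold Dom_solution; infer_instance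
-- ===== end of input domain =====

-- B replaces A's recursive memoized top-down search with an explicit bottom-up row-by-row DP (alternative decomposition, same cost).

-- ===== PORT A =====
-- A's inner find_dp with its memo table, threaded as a dictionary keyed by (nn, cc).
-- The fuel only makes the recursion structural: on inputs admitted by Pre_solution the
-- Python recursion depth is at most n - 1 ≤ 100 < 202, so the fuel never runs out there.
def findDpA (n count : Int) : Nat → Int → Int → PySem.Dict (Int × Int) Int → Int × PySem.Dict (Int × Int) Int
  | 0, _, _, dp => (0, dp)
  | fuel+1, nn, cc, dp =>
    if nn = n ∧ cc = count then (1, dp)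
    else if nn = n ∨ cc > count then (0, dp)
    else match dp.get? (nn, cc) with
      | some v => (v, dp)
      | none =>
        let r1 := findDpA n count fuel (nn+1) (cc+1) dp
        let r2 := findDpA n count fuel (nn+1) cc r1.2
        let v := PySem.Int.mod (r1.1 + nn * 2 * r2.1) 1000000007
        (v, r2.2.insert (nn, cc) v)

def solution (n : Int) (count : Int) : Int :=
  (findDpA n count 202 1 1 PySem.Dict.empty).1

-- ===== PORT B =====
def solution_alt (n : Int) (count : Int) : Int :=
  if count < 1 ∨ count > n then 0
  else
    let init : List Int :=
      0 :: ((PySem.List.pyRange 1 (count+1) 1).map (fun cc => if cc = count then (1:Int) else 0)) ++ [0]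
    let final := (PySem.List.pyRange (n-1) 0 (-1)).foldl
      (fun cur nn =>
        0 :: ((PySem.List.pyRange 1 (count+1) 1).map
          (fun cc => PySem.Int.mod (PySem.List.pyGetD cur (cc+1) 0 + 2 * nn * PySem.List.pyGetD cur cc 0) 1000000007)) ++ [0])
      init
    PySem.List.pyGetD final 1 0

-- ===== PRECONDITION & SPEC =====
-- Pre_ excludes exactly the inputs where A raises IndexError: with count ≥ 1 the recursion
-- only stops at level n, so n ≤ 0 or n ≥ 102 overruns the fixed 101×101 memo array.
def Pre_solution (n : Int) (count : Int) : Prop := count ≤ 0 ∨ (1 ≤ n ∧ n ≤ 101)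
instance (n : Int) (count : Int) : Decidable (Pre_solution n count) := by unfold Pre_solution; infer_instance
def pvWitness_solution : Int × Int := (3, 2)

def Spec_solution (n : Int) (count : Int) (out : Int) : Prop := out = solution_alt n count
instance (n : Int) (count : Int) (out : Int) : Decidable (Spec_solution n count out) := by unfold Spec_solution; infer_instance

-- ===== CLAIM (what is proved, stated in full; the proofs are below) =====
def Claim_equal_solution : Prop := ∀ (n : Int) (count : Int), Dom_solution n count → Pre_solution n count → Spec_solution n count (solution n count)

-- ===== LEMMAS AND PROOFS =====

-- Pure (memo-free) version of the recurrence, by fuel.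
def pvF (n count : Int) : Nat → Int → Int → Int
  | 0, _, _ => 0
  | fuel+1, nn, cc =>
    if nn = n ∧ cc = count then 1
    else if nn = n ∨ cc > count then 0
    else PySem.Int.mod (pvF n count fuel (nn+1) (cc+1) + nn * 2 * pvF n count fuel (nn+1) cc) 1000000007

theorem pvF_stable (n count : Int) : ∀ (f1 f2 : Nat) (nn cc : Int), nn ≤ n →
    (n - nn).toNat < f1 → (n - nn).toNat < f2 → pvF n count f1 nn cc = pvF n count f2 nn cc := by
  intro f1
  induction f1 with
  | zero => intro f2 nn cc _ h1 _; omega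
  | succ f ih =>
    intro f2 nn cc hle h1 h2
    cases f2 with
    | zero => omega
    | succ g =>
      by_cases hA : nn = n ∧ cc = count
      · simp [pvF, hA]
      · by_cases hB : nn = n ∨ cc > count
        · simp [pvF, hA, hB]
        · have hne : nn ≠ n := fun h => hB (Or.inl h)
          simp only [pvF, if_neg hA, if_neg hB]
          rw [ih g (nn+1) (cc+1) (by omega) (by omega) (by omega),
              ih g (nn+1) cc (by omega) (by omega) (by omega)]

-- dp only ever stores values of pvF
def pvGood (n count : Int) (dp : PySem.Dict (Int × Int) Int) : Prop :=
  ∀ nn cc v, dp.get? (nn, cc) = some v → v = pvF n count ((n - nn).toNat + 1) nn cc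

theorem findDpA_correct (n count : Int) : ∀ (fuel : Nat) (nn cc : Int) (dp : PySem.Dict (Int × Int) Int),
    pvGood n count dp → nn ≤ n → (n - nn).toNat < fuel →
    (findDpA n count fuel nn cc dp).1 = pvF n count ((n - nn).toNat + 1) nn cc ∧
    pvGood n count (findDpA n count fuel nn cc dp).2 := by
  intro fuel
  induction fuel with
  | zero => intro nn cc dp _ _ h; omega
  | succ f ih =>
    intro nn cc dp hg hle hf
    by_cases hA : nn = n ∧ cc = count
    · exact ⟨by simp [findDpA, pvF, hA], by simpa [findDpA, hA] using hg⟩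
    · by_cases hB : nn = n ∨ cc > count
      · exact ⟨by simp [findDpA, pvF, hA, hB], by simpa [findDpA, hA, hB] using hg⟩
      · have hne : nn ≠ n := fun h => hB (Or.inl h)
        cases hdp : dp.get? (nn, cc) with
        | some v =>
          refine ⟨?_, ?_⟩
          · simp only [findDpA, if_neg hA, if_neg hB, hdp]
            exact hg nn cc v hdp
          · simpa [findDpA, if_neg hA, if_neg hB, hdp] using hg
        | none =>
          have h1 := ih (nn+1) (cc+1) dp hg (by omega) (by omega)
          have h2 := ih (nn+1) cc (findDpA n count f (nn+1) (cc+1) dp).2 h1.2 (by omega) (by omega)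
          have hstep : pvF n count ((n - nn).toNat + 1) nn cc =
              PySem.Int.mod ((findDpA n count f (nn+1) (cc+1) dp).1 +
                nn * 2 * (findDpA n count f (nn+1) cc (findDpA n count f (nn+1) (cc+1) dp).2).1) 1000000007 := by
            rw [h1.1, h2.1]
            have hun : pvF n count ((n - nn).toNat + 1) nn cc =
                PySem.Int.mod (pvF n count (n - nn).toNat (nn+1) (cc+1) +
                  nn * 2 * pvF n count (n - nn).toNat (nn+1) cc) 1000000007 := by
              conv_lhs => rw [pvF]
              rw [if_neg hA, if_neg hB]
            rw [hun,
                pvF_stable n count ((n - nn).toNat) ((n - (nn+1)).toNat + 1) (nn+1) (cc+1) (by omega) (by omega) (by omega),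
                pvF_stable n count ((n - nn).toNat) ((n - (nn+1)).toNat + 1) (nn+1) cc (by omega) (by omega) (by omega)]
          refine ⟨?_, ?_⟩
          · simp only [findDpA, if_neg hA, if_neg hB, hdp]
            exact hstep.symm
          · simp only [findDpA, if_neg hA, if_neg hB, hdp]
            intro nn' cc' v' hv'
            rw [PySem.Dict.get?_insert] at hv'
            by_cases he : (nn', cc') = (nn, cc)
            · rw [if_pos he] at hv'
              obtain ⟨he1, he2⟩ := Prod.mk.injEq .. ▸ he
              cases hv'
              subst he1; subst he2
              exact hstep.symm
            · rw [if_neg he] at hv'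
              exact h2.2 nn' cc' v' hv' 

theorem pvF_zero (n count : Int) : ∀ (fuel : Nat) (nn cc : Int), nn ≤ n →
    n - nn < count - cc → pvF n count fuel nn cc = 0 := by
  intro fuel
  induction fuel with
  | zero => intro nn cc _ _; rfl
  | succ f ih =>
    intro nn cc hle hlt
    have hA : ¬ (nn = n ∧ cc = count) := by rintro ⟨h1, h2⟩; omega
    by_cases hB : nn = n ∨ cc > count
    · simp [pvF, hA, hB]
    · have hne : nn ≠ n := fun h => hB (Or.inl h)
      simp only [pvF, if_neg hA, if_neg hB]
      rw [ih (nn+1) (cc+1) (by omega) (by omega), ih (nn+1) cc (by omega) (by omega)]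
      norm_num

-- getD on a row literal 0 :: [f cc for cc in range(1, count+1)] ++ [0]
theorem row_getD (count : Int) (f : Int → Int) (j : Int) (h1 : 1 ≤ j) (h2 : j ≤ count + 1) :
    PySem.List.pyGetD (0 :: ((PySem.List.pyRange 1 (count+1) 1).map f) ++ [0]) j 0
      = if j ≤ count then f j else 0 := by
  have hk : ((PySem.List.pyRange 1 (count+1) 1).map f).length = count.toNat := by
    rw [List.length_map, PySem.List.length_pyRange_one]; omega
  have hlen : (0 :: ((PySem.List.pyRange 1 (count+1) 1).map f) ++ [0]).length = count.toNat + 2 := by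
    simp [hk]
  obtain ⟨m, hm⟩ : ∃ m : Nat, j.toNat = m + 1 := ⟨j.toNat - 1, by omega⟩
  have hj : j = (m : Int) + 1 := by omega
  rw [PySem.List.pyGetD_eq_getElem _ 0 (by omega) (by rw [hlen]; push_cast; omega)]
  simp only [hm]
  by_cases hcase : m < count.toNat
  · rw [List.getElem_append_left (by simp [hk]; omega), List.getElem_cons_succ,
        List.getElem_map, PySem.List.getElem_pyRange_one]
    rw [if_pos (by omega)]
    rw [hj]
    congr 1
    ring
  · have hm' : m = count.toNat := by omega
    rw [List.getElem_append_right (by simp [hk]; omega)]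
    simp only [List.length_cons, hk, hm', Nat.sub_self, List.getElem_singleton]
    rw [if_neg (by omega)]

-- cur is the DP row of level lvl
def pvIsRow (n count lvl : Int) (cur : List Int) : Prop :=
  ∀ j : Int, 1 ≤ j → j ≤ count + 1 →
    PySem.List.pyGetD cur j 0 = pvF n count ((n - lvl).toNat + 1) lvl j

theorem init_row (n count : Int) (_hc : 1 ≤ count) (_hcn : count ≤ n) :
    pvIsRow n count n
      (0 :: ((PySem.List.pyRange 1 (count+1) 1).map (fun cc => if cc = count then (1:Int) else 0)) ++ [0]) := by
  intro j h1 h2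
  rw [row_getD count _ j h1 h2]
  have hfu : (n - n).toNat + 1 = 1 := by omega
  rw [hfu]
  have hv : pvF n count 1 n j = if j = count then 1 else 0 := by
    conv_lhs => rw [pvF]
    by_cases hj : j = count
    · rw [if_pos ⟨rfl, hj⟩, if_pos hj]
    · rw [if_neg (by rintro ⟨_, h⟩; exact hj h), if_pos (Or.inl rfl), if_neg hj]
  rw [hv]
  by_cases hjc : j ≤ count
  · rw [if_pos hjc]
  · rw [if_neg hjc, if_neg (by omega)]

set_option maxHeartbeats 1000000 in
theorem loop_inv (n count : Int) (_hc : 1 ≤ count) (_hcn : count ≤ n) :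
    ∀ (m : Nat) (cur : List Int), (m : Int) ≤ n - 1 → pvIsRow n count ((m : Int) + 1) cur →
      pvIsRow n count 1 ((PySem.List.pyRange (m : Int) 0 (-1)).foldl
        (fun cur nn =>
          0 :: ((PySem.List.pyRange 1 (count+1) 1).map
            (fun cc => PySem.Int.mod (PySem.List.pyGetD cur (cc+1) 0 + 2 * nn * PySem.List.pyGetD cur cc 0) 1000000007)) ++ [0])
        cur) := by
  intro m
  induction m with
  | zero =>
    intro cur _ hrow
    rw [PySem.List.pyRange_neg_one_eq_nil (by omega)]
    simpa using hrow
  | succ m ih =>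
    intro cur hm hrow
    push_cast at hm hrow
    rw [show ((m + 1 : Nat) : Int) = (m : Int) + 1 by push_cast; ring,
        PySem.List.pyRange_neg_one_cons (by omega), List.foldl_cons,
        show (m : Int) + 1 - 1 = (m : Int) by ring]
    refine ih _ (by omega) ?_
    intro j h1 h2
    rw [row_getD count _ j h1 h2]
    by_cases hj : j ≤ count
    · rw [if_pos hj]
      have hA : ¬ ((m : Int) + 1 = n ∧ j = count) := by rintro ⟨ha, _⟩; omega
      have hB : ¬ ((m : Int) + 1 = n ∨ j > count) := by rintro (ha | ha) <;> omega
      have hun : pvF n count ((n - ((m : Int) + 1)).toNat + 1) ((m : Int) + 1) j =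
          PySem.Int.mod (pvF n count (n - ((m : Int) + 1)).toNat ((m : Int) + 1 + 1) (j+1) +
            ((m : Int) + 1) * 2 * pvF n count (n - ((m : Int) + 1)).toNat ((m : Int) + 1 + 1) j) 1000000007 := by
        conv_lhs => rw [pvF]
        rw [if_neg hA, if_neg hB]
      rw [hun,
          pvF_stable n count ((n - ((m : Int) + 1)).toNat) ((n - ((m : Int) + 1 + 1)).toNat + 1) _ (j+1) (by omega) (by omega) (by omega),
          pvF_stable n count ((n - ((m : Int) + 1)).toNat) ((n - ((m : Int) + 1 + 1)).toNat + 1) _ j (by omega) (by omega) (by omega),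
          hrow (j+1) (by omega) (by omega), hrow j (by omega) (by omega)]
      congr 1
      ring
    · rw [if_neg hj]
      have hj' : j = count + 1 := by omega
      have : pvF n count ((n - ((m : Int) + 1)).toNat + 1) ((m : Int) + 1) j = 0 := by
        conv_lhs => rw [pvF]
        rw [if_neg (by rintro ⟨_, hb⟩; omega), if_pos (Or.inr (by omega))]
      rw [this]

-- ===== VERDICT (by name: the statement is the Claim_ definition above) =====
theorem solution_spec : Claim_equal_solution := by
  intro n count _ hpre
  unfold Spec_solution
  by_cases hc : count < 1
  · have hA : solution n count = 0 := by
      unfold solution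
      rw [show (202 : Nat) = 201 + 1 from rfl]
      conv_lhs => rw [findDpA]
      rw [if_neg (by rintro ⟨_, h⟩; omega), if_pos (Or.inr (by omega))]
    have hB : solution_alt n count = 0 := by
      unfold solution_alt
      rw [if_pos (Or.inl hc)]
    rw [hA, hB]
  · have hn : 1 ≤ n ∧ n ≤ 101 := by
      rcases hpre with h | h
      · omega
      · exact h
    have hgood : pvGood n count PySem.Dict.empty := by
      intro nn cc v h
      rw [PySem.Dict.get?_empty] at h
      cases h
    have hA : solution n count = pvF n count ((n - 1).toNat + 1) 1 1 :=
      (findDpA_correct n count 202 1 1 PySem.Dict.empty hgood (by omega) (by omega)).1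
    rw [hA]
    by_cases hgt : count > n
    · have hB : solution_alt n count = 0 := by
        unfold solution_alt
        rw [if_pos (Or.inr hgt)]
      rw [hB, pvF_zero n count _ 1 1 (by omega) (by omega)]
    · have hcast : (((n - 1).toNat : Nat) : Int) = n - 1 := by omega
      have hinit := init_row n count (by omega) (by omega)
      have hrow0 : pvIsRow n count (((n - 1).toNat : Int) + 1)
          (0 :: ((PySem.List.pyRange 1 (count+1) 1).map (fun cc => if cc = count then (1:Int) else 0)) ++ [0]) := by
        rw [hcast, show n - 1 + 1 = n by ring]
        exact hinit
      have hfin := loop_inv n count (by omega) (by omega) (n - 1).toNat _ (by omega) hrow0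
      rw [hcast] at hfin
      have hval := hfin 1 (by omega) (by omega)
      unfold solution_alt
      rw [if_neg (show ¬ (count < 1 ∨ count > n) by omega)]
      exact hval.symm
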